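-- pv_equiv track=rewrite | github.com/miltonpalacin/uni_02_si | homework/alglib/meta/aco.py | max_candidate
-- ===== SOURCE A (Python) =====
-- def max_candidate(candidates_path):
--     max_cand = 0
--     best_cand = []
--
--     for candidate in candidates_path:
--         if max_cand <= candidate[0]:
--             max_cand = candidate[0]
--             best_cand = candidate
--
--     if max_cand == 0:
--         best_cand = [0, []]
--
--     return best_cand
-- ===== SOURCE B (Python) =====
-- def max_candidate(candidates_path):
--     pos = [c for c in candidates_path if c[0] > 0]
--     if not pos:
--         return [0, []]
--     m = max(c[0] for c in pos)
--     for c in reversed(pos):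
--         if c[0] == m:
--             return c
-- ===== Notes on version B (the rewrite author's own statement) =====
-- stated objective: alternative
-- what changed: Replaces A's single running-max scan carrying two loop variables by a filter-then-reduce-then-select pipeline: keep only candidates with positive first element, take the max of their first elements, and return the last candidate attaining it.
-- outside the precondition, e.g. on max_candidate([[-1, 2], [0, 3]]): A returns [0, []], B returns [0, []]; on max_candidate([]): A returns [0, []], B returns [0, []]; on max_candidate([[]]): A raises IndexError, B raises IndexError
import Mathlib
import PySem

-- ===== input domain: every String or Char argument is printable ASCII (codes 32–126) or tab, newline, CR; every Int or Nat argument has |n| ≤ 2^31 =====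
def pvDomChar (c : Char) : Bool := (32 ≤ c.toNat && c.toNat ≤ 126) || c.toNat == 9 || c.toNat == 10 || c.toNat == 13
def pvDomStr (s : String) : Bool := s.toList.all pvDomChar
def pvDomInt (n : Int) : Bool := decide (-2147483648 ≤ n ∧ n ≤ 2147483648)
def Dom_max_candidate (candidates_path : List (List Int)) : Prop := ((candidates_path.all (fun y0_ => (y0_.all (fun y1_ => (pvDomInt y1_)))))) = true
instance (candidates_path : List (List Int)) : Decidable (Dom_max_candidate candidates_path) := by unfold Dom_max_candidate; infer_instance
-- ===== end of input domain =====

-- B replaces A's single running-max scan by a filter / max-reduce / last-match-select pipeline (alternative decomposition, same cost).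
-- Python's sentinel return [0, []] (a heterogeneous list, not a list of ints) and the IndexError on an empty candidate are excluded by Pre_.


-- candidate[0]; Pre_ guarantees every candidate is nonempty, so the default 0 is never read
def pvHd (c : List Int) : Int := PySem.List.pyGetD c 0 0

-- ===== PORT A =====
-- the loop carries (max_cand, best_cand); when max_cand == 0 Python returns [0, []], which is
-- not a list of ints — that case is outside Pre_ and the port returns [] there
def max_candidate (candidates_path : List (List Int)) : List Int :=
  let s := candidates_path.foldl
    (fun (s : Int × List Int) candidate =>
      if s.1 ≤ pvHd candidate then (pvHd candidate, candidate) else s)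
    (0, [])
  if s.1 = 0 then [] else s.2

-- ===== PORT B =====
def max_candidate_alt (candidates_path : List (List Int)) : List Int :=
  let pos := candidates_path.filter (fun c => 0 < pvHd c)
  if pos.isEmpty then []    -- Python returns [0, []] here: not a list of ints, outside Pre_
  else
    let m := (PySem.List.max? (pos.map (fun c => pvHd c)) (fun y => y)).getD 0
    (pos.reverse.find? (fun c => pvHd c == m)).getD []

-- ===== PRECONDITION & SPEC =====
-- Pre_ excludes (i) inputs with an empty candidate, where A raises IndexError, and
-- (ii) inputs with no candidate whose first element is positive, where A returns the
-- sentinel [0, []] — a heterogeneous list that is not a value of type List Int.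
def Pre_max_candidate (candidates_path : List (List Int)) : Prop :=
  (∀ c ∈ candidates_path, c ≠ []) ∧ (∃ c ∈ candidates_path, 0 < pvHd c)
instance (candidates_path : List (List Int)) : Decidable (Pre_max_candidate candidates_path) := by unfold Pre_max_candidate; infer_instance

def pvWitness_max_candidate : List (List Int) := [[2, 7], [3, 1], [3, 9], [-1]]

def Spec_max_candidate (candidates_path : List (List Int)) (out : List Int) : Prop := out = max_candidate_alt candidates_path
instance (candidates_path : List (List Int)) (out : List Int) : Decidable (Spec_max_candidate candidates_path out) := by unfold Spec_max_candidate; infer_instance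

-- ===== CLAIM (what is proved, stated in full; the proofs are below) =====
def Claim_equal_max_candidate : Prop := ∀ (candidates_path : List (List Int)), Dom_max_candidate candidates_path → Pre_max_candidate candidates_path → Spec_max_candidate candidates_path (max_candidate candidates_path)

-- ===== LEMMAS AND PROOFS =====

-- A's loop step and the running maximum, named for the proofs
def pvStep (s : Int × List Int) (c : List Int) : Int × List Int :=
  if s.1 ≤ pvHd c then (pvHd c, c) else s

def pvM (l : List (List Int)) : Int := l.foldl (fun a c => max a (pvHd c)) 0

lemma pvStep_eq : (fun (s : Int × List Int) (candidate : List Int) =>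
    if s.1 ≤ pvHd candidate then (pvHd candidate, candidate) else s) = pvStep := rfl

lemma fold_fst (l : List (List Int)) : ∀ (m : Int) (b : List Int),
    (l.foldl pvStep (m, b)).1 = l.foldl (fun a c => max a (pvHd c)) m := by
  induction l with
  | nil => intro m b; rfl
  | cons c t ih =>
    intro m b
    simp only [List.foldl_cons, pvStep]
    split_ifs with h
    · rw [ih]; congr 1; omega
    · rw [ih]; congr 1; omega

lemma pvM_nonneg (l : List (List Int)) : 0 ≤ pvM l :=
  (PySem.List.le_foldl_max_int l pvHd 0).1

lemma pvM_append (l : List (List Int)) (c : List Int) :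
    pvM (l ++ [c]) = max (pvM l) (pvHd c) := by
  simp [pvM, List.foldl_append]

-- A's result characterised: when the running max is positive, the loop's best candidate is the
-- last positive-headed candidate attaining it.
lemma key (l : List (List Int)) (h : 0 < pvM l) :
    ((l.filter (fun c => 0 < pvHd c)).reverse.find? (fun c => pvHd c == pvM l))
      = some (l.foldl pvStep (0, [])).2 := by
  induction l using List.reverseRecOn with
  | nil => simp [pvM] at h
  | append_singleton t c ih =>
    have hM := pvM_append t c
    have hMt := pvM_nonneg t
    rw [List.foldl_append]
    simp only [List.foldl_cons, List.foldl_nil]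
    have hfst : (t.foldl pvStep (0, [])).1 = pvM t := fold_fst t 0 []
    rw [List.filter_append, List.reverse_append]
    by_cases hc : 0 < pvHd c
    · have hfc : List.filter (fun c => decide (0 < pvHd c)) [c] = [c] := by simp [hc]
      rw [hfc]
      simp only [List.reverse_cons, List.reverse_nil, List.nil_append, List.cons_append]
      by_cases hle : pvM t ≤ pvHd c
      · have : pvM (t ++ [c]) = pvHd c := by omega
        rw [this]
        have hstep : pvStep (t.foldl pvStep (0, [])) c = (pvHd c, c) := by
          simp [pvStep, hfst, hle]
        rw [hstep, List.find?_cons_of_pos (by simp)]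
      · have hMeq : pvM (t ++ [c]) = pvM t := by omega
        rw [hMeq]
        have hstep : pvStep (t.foldl pvStep (0, [])) c = t.foldl pvStep (0, []) := by
          simp [pvStep, hfst]; omega
        rw [hstep, List.find?_cons_of_neg (by simp; omega)]
        exact ih (by omega)
    · have hfc : List.filter (fun c => decide (0 < pvHd c)) [c] = [] := by simp [hc]
      rw [hfc]
      have hMeq : pvM (t ++ [c]) = pvM t := by omega
      rw [hMeq] at h ⊢
      have hstep : pvStep (t.foldl pvStep (0, [])) c = t.foldl pvStep (0, []) := by
        simp [pvStep, hfst]; omega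
      simp only [List.reverse_nil, List.nil_append, hstep]
      exact ih h

-- the max over the positive candidates' heads equals the loop's running max
lemma pvM_filter (l : List (List Int)) : ∀ (a : Int), 0 ≤ a →
    l.foldl (fun x c => max x (pvHd c)) a
      = (l.filter (fun c => 0 < pvHd c)).foldl (fun x c => max x (pvHd c)) a := by
  induction l with
  | nil => intro a _; rfl
  | cons c t ih =>
    intro a ha
    by_cases hc : 0 < pvHd c
    · rw [List.filter_cons_of_pos (by simp [hc])]
      simp only [List.foldl_cons]
      exact ih _ (by omega)
    · rw [List.filter_cons_of_neg (by simp [hc])]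
      simp only [List.foldl_cons]
      have : max a (pvHd c) = a := by omega
      rw [this]
      exact ih _ ha

-- ===== VERDICT (by name: the statement is the Claim_ definition above) =====
theorem max_candidate_spec : Claim_equal_max_candidate := by
  intro l _ hpre
  obtain ⟨_, hex⟩ := hpre
  unfold Spec_max_candidate max_candidate max_candidate_alt
  simp only [pvStep_eq]
  -- the filtered list is nonempty
  have hposne : l.filter (fun c => 0 < pvHd c) ≠ [] := by
    obtain ⟨c, hc, hpos⟩ := hex
    intro hnil
    have : c ∈ l.filter (fun c => 0 < pvHd c) := List.mem_filter.mpr ⟨hc, by simp [hpos]⟩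
    simp [hnil] at this
  obtain ⟨p, ps, hpos⟩ : ∃ p ps, l.filter (fun c => 0 < pvHd c) = p :: ps :=
    List.exists_cons_of_ne_nil hposne
  have hp : 0 < pvHd p := by
    have : p ∈ l.filter (fun c => 0 < pvHd c) := by rw [hpos]; exact List.mem_cons_self
    simpa using (List.mem_filter.mp this).2
  -- running max is positive and equals B's max
  have hMfilter : pvM l = (ps.map (fun c => pvHd c)).foldl max (pvHd p) := by
    rw [pvM, pvM_filter l 0 le_rfl, hpos]
    simp only [List.foldl_cons, List.foldl_map]
    congr 1
    omega
  have hMpos : 0 < pvM l := by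
    rw [hMfilter]
    have := (PySem.List.le_foldl_max_int ps pvHd (pvHd p)).1
    simp only [List.foldl_map]
    omega
  have hfst : (l.foldl pvStep (0, [])).1 = pvM l := fold_fst l 0 []
  rw [hpos]
  simp only [List.isEmpty_cons, Bool.false_eq_true, if_false]
  rw [List.map_cons, PySem.List.max?_id_cons]
  simp only [Option.getD_some]
  rw [← hpos, ← hMfilter]
  have hfind := key l hMpos
  rw [hfind]
  simp only [Option.getD_some]
  rw [hfst]
  rw [if_neg (by omega)]
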